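-- pv_equiv track=rewrite | github.com/sehagler/nlp_pipeline | development/query_lib/processor_lib/karyotype_tools.py | atomize_karyotype
-- ===== SOURCE A (Python) =====
-- def atomize_karyotype(full_karyotype):
--     karyotype_atoms = {}
--     karyotypes_0 = full_karyotype.split('//')
--     for karyotype_0 in karyotypes_0:
--         karyotypes_1 = karyotype_0.split('/')
--         for karyotype_1 in karyotypes_1:
--             karyotype_1 = karyotype_1.split('[')
--             if len(karyotype_1) == 2:
--                 count = '[' + karyotype_1[1]
--             else:
--                 count = ''
--             karyotype_1 = karyotype_1[0]
--             karyotype_1_atoms = karyotype_1.split(',')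
--             if 'chromosome count' not in karyotype_atoms.keys():
--                 karyotype_atoms['chromosome count'] = karyotype_1_atoms[0] + count
--             else:
--                 karyotype_atoms['chromosome count'] += '/' + karyotype_1_atoms[0] + count
--             if 'sex chromosomes' not in karyotype_atoms.keys():
--                 karyotype_atoms['sex chromosomes'] = karyotype_1_atoms[1] + count
--             else:
--                 karyotype_atoms['sex chromosomes'] += '/' + karyotype_1_atoms[1] + count
--             for i in range(len(karyotype_1_atoms)-2):
--                 if karyotype_1_atoms[i+2] not in karyotype_atoms.keys():
--                     karyotype_atoms[karyotype_1_atoms[i+2]] = count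
--                 else:
--                     karyotype_atoms[karyotype_1_atoms[i+2]] += '/' + count
--     return karyotype_atoms
-- ===== SOURCE B (Python) =====
-- def atomize_karyotype(full_karyotype):
--     # Phase 1: flatten the karyotype into a stream of (key, value) events.
--     events = []
--     for part in full_karyotype.split('//'):
--         for seg in part.split('/'):
--             pieces = seg.split('[')
--             count = '[' + pieces[1] if len(pieces) == 2 else ''
--             atoms = pieces[0].split(',')
--             events.append(('chromosome count', atoms[0] + count))
--             events.append(('sex chromosomes', atoms[1] + count))
--             events.extend((name, count) for name in atoms[2:])
--     # Phase 2: keys in first-occurrence order; gather each key's values from the stream.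
--     keys = list(dict.fromkeys(key for key, _ in events))
--     return {key: '/'.join(val for k, val in events if k == key) for key in keys}
-- ===== Notes on version B (the rewrite author's own statement) =====
-- stated objective: alternative
-- what changed: B is a two-phase algorithm: it first flattens the karyotype into a flat list of (key, value) events with no dictionary at all, then rebuilds the result from the deduplicated keys in first-occurrence order, gathering and slash-joining each key's values from the event list, instead of A's single pass that mutates a dict per event with branch-on-presence in-place string-append updates.
import Mathlib
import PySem

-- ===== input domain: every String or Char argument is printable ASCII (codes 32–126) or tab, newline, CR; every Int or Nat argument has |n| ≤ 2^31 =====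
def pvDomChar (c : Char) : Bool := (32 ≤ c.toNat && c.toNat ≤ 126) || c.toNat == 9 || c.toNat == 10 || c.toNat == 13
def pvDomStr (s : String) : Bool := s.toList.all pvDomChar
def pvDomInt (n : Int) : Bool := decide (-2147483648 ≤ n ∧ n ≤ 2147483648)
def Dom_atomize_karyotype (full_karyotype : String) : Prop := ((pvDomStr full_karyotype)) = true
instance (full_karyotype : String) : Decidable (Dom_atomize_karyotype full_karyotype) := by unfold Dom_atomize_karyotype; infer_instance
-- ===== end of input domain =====

-- B replaces A's single-pass dict mutation (per-key branch on presence with in-place string appends) by a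
-- two-phase algorithm: flatten the karyotype into a flat (key, value) event list, then rebuild
-- the result from deduplicated keys with a per-key gather and slash-join over that list; objective: alternative.

-- ===== PORT A =====
-- A-side helper: the body of A's inner `for karyotype_1 in karyotypes_1` loop
def pvStepA (d : PySem.Dict String String) (karyotype_1 : String) : PySem.Dict String String :=
  let parts := (PySem.Str.split? karyotype_1 "[").getD []
  let count := if parts.length = 2 then "[" ++ (PySem.List.pyGet? parts 1).getD "" else ""
  let k1 := (PySem.List.pyGet? parts 0).getD ""
  let atoms := (PySem.Str.split? k1 ",").getD []
  let a0 := (PySem.List.pyGet? atoms 0).getD ""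
  -- second atom: Python raises IndexError when the segment has no comma; those inputs are outside Pre_
  let a1 := (PySem.List.pyGet? atoms 1).getD ""
  let d := if d.contains "chromosome count" = false
           then d.insert "chromosome count" (a0 ++ count)
           else d.insert "chromosome count" (d.getD "chromosome count" "" ++ ("/" ++ a0 ++ count))
  let d := if d.contains "sex chromosomes" = false
           then d.insert "sex chromosomes" (a1 ++ count)
           else d.insert "sex chromosomes" (d.getD "sex chromosomes" "" ++ ("/" ++ a1 ++ count))
  (PySem.List.pyRange 0 ((atoms.length : Int) - 2)).foldl (fun d i =>
    let key := (PySem.List.pyGet? atoms (i + 2)).getD ""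
    if d.contains key = false then d.insert key count
    else d.insert key (d.getD key "" ++ ("/" ++ count))) d

def atomize_karyotype (full_karyotype : String) : List (String × String) :=
  -- the four separator literals are non-empty, so split? is always `some`
  let karyotypes_0 := (PySem.Str.split? full_karyotype "//").getD []
  let d := karyotypes_0.foldl (fun d karyotype_0 =>
    ((PySem.Str.split? karyotype_0 "/").getD []).foldl pvStepA d) PySem.Dict.empty
  d.items

-- ===== PORT B =====
-- B-side helper: the (key, value) events B's loop body appends for one segment
def pvEventsOf (seg : String) : List (String × String) :=
  let pieces := (PySem.Str.split? seg "[").getD []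
  let count := if pieces.length = 2 then "[" ++ (PySem.List.pyGet? pieces 1).getD "" else ""
  let atoms := (PySem.Str.split? ((PySem.List.pyGet? pieces 0).getD "") ",").getD []
  -- second atom: same IndexError spot as in A; outside Pre_
  [("chromosome count", (PySem.List.pyGet? atoms 0).getD "" ++ count),
   ("sex chromosomes", (PySem.List.pyGet? atoms 1).getD "" ++ count)]
  ++ (PySem.List.slice atoms (some 2) none).map (fun name => (name, count))

def atomize_karyotype_alt (full_karyotype : String) : List (String × String) :=
  let events := ((PySem.Str.split? full_karyotype "//").getD []).foldl
      (fun ev part => ((PySem.Str.split? part "/").getD []).foldl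
        (fun ev seg => ev ++ pvEventsOf seg) ev) []
  let keys := PySem.List.dedup (events.map Prod.fst)
  keys.map (fun key =>
    (key, PySem.Str.join "/" ((events.filter (fun e => e.1 == key)).map Prod.snd)))

-- ===== PRECONDITION & SPEC =====
-- Pre_ excludes exactly the inputs where Python raises IndexError: a segment whose text
-- before the first opening bracket contains no comma (the second atom does not exist).
def Pre_atomize_karyotype (full_karyotype : String) : Prop :=
  ∀ part ∈ (PySem.Str.split? full_karyotype "//").getD [],
    ∀ seg ∈ (PySem.Str.split? part "/").getD [],
      ',' ∈ seg.toList.takeWhile (· ≠ '[')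

instance (full_karyotype : String) : Decidable (Pre_atomize_karyotype full_karyotype) := by
  unfold Pre_atomize_karyotype; infer_instance

def pvWitness_atomize_karyotype : String := "46,XX[20]//45,X,-Y/46,XY[10]"

def Spec_atomize_karyotype (full_karyotype : String) (out : List (String × String)) : Prop := out = atomize_karyotype_alt full_karyotype
instance (full_karyotype : String) (out : List (String × String)) : Decidable (Spec_atomize_karyotype full_karyotype out) := by unfold Spec_atomize_karyotype; infer_instance

-- ===== CLAIM (what is proved, stated in full; the proofs are below) =====
def Claim_equal_atomize_karyotype : Prop := ∀ (full_karyotype : String), Dom_atomize_karyotype full_karyotype → Pre_atomize_karyotype full_karyotype → Spec_atomize_karyotype full_karyotype (atomize_karyotype full_karyotype)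

-- ===== LEMMAS AND PROOFS =====

-- A's per-key update, over one (key, value) event
def pvPush (d : PySem.Dict String String) (ev : String × String) : PySem.Dict String String :=
  if d.contains ev.1 = false then d.insert ev.1 ev.2
  else d.insert ev.1 (d.getD ev.1 "" ++ ("/" ++ ev.2))

-- join of the values the event stream carries for key k (the body of B's final comprehension)
def pvJoined (events : List (String × String)) (k : String) : String :=
  PySem.Str.join "/" ((events.filter (fun e => e.1 == k)).map Prod.snd)

-- explicit form of the result: deduped keys, each paired with its joined values
def pvEval (events : List (String × String)) : List (String × String) :=
  (PySem.List.dedup (events.map Prod.fst)).map (fun k => (k, pvJoined events k))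

theorem pv_intercalate_append (sep v : List Char) : ∀ (s : List (List Char)), s ≠ [] →
    sep.intercalate (s ++ [v]) = sep.intercalate s ++ sep ++ v := by
  intro s
  induction s with
  | nil => simp
  | cons a t ih =>
    intro _
    cases t with
    | nil => simp [List.intercalate, List.intersperse]
    | cons b u =>
      have := ih (by simp)
      simp only [List.intercalate, List.cons_append, List.intersperse, List.flatten_cons] at *
      simp [this]

theorem pv_join_singleton (v : String) : PySem.Str.join "/" [v] = v := by
  simp [PySem.Str.join, PySem.Chars.join, List.intercalate]

theorem pv_join_append (s : List String) (v : String) (h : s ≠ []) :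
    PySem.Str.join "/" (s ++ [v]) = PySem.Str.join "/" s ++ ("/" ++ v) := by
  simp only [PySem.Str.join]
  rw [← String.toList_inj]
  simp only [String.toList_append, String.toList_ofList, List.map_append, List.map_cons,
    List.map_nil]
  rw [PySem.Chars.join, PySem.Chars.join,
    pv_intercalate_append _ _ _ (by simpa using h)]
  simp

-- dedup of a list with one element appended
theorem pv_dedup_concat (l : List String) (x : String) :
    PySem.List.dedup (l ++ [x]) =
      if x ∈ l then PySem.List.dedup l else PySem.List.dedup l ++ [x] := by
  have h1 : PySem.List.dedup (l ++ [x]) = PySem.Set.add (PySem.List.dedup l) x := by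
    simp only [PySem.List.dedup, PySem.Set.ofList, List.foldl_append, List.foldl_cons,
      List.foldl_nil]
  rw [h1, PySem.Set.add]
  by_cases hx : x ∈ l
  · rw [if_pos (by simp [PySem.List.dedup, PySem.Set.mem_ofList, hx]),
      if_pos hx]
  · rw [if_neg (by simp [PySem.List.dedup, PySem.Set.mem_ofList, hx]),
      if_neg hx]

-- first match in the evaluated items list
theorem pv_find?_map_pair (keys : List String) (g : String → String) (k : String)
    (hm : k ∈ keys) :
    (keys.map (fun k' => (k', g k'))).find? (fun p => p.1 == k) = some (k, g k) := by
  induction keys with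
  | nil => cases hm
  | cons a t ih =>
    by_cases hak : a = k
    · subst hak; simp
    · have : k ∈ t := by cases hm with
        | head => exact absurd rfl hak
        | tail _ h => exact h
      rw [List.map_cons, List.find?_cons_of_neg (by simpa using hak)]
      exact ih this

-- a key is absent from the stream iff its filter is empty
theorem pv_filter_eq_nil (events : List (String × String)) (k : String)
    (h : k ∉ events.map Prod.fst) :
    events.filter (fun e => e.1 == k) = [] := by
  rw [List.filter_eq_nil_iff]
  intro p hp hpk
  exact h (List.mem_map.mpr ⟨p, hp, by simpa using hpk⟩)

theorem pv_filter_ne_nil (events : List (String × String)) (k : String)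
    (h : k ∈ events.map Prod.fst) :
    events.filter (fun e => e.1 == k) ≠ [] := by
  obtain ⟨p, hp, rfl⟩ := List.mem_map.mp h
  intro hnil
  rw [List.filter_eq_nil_iff] at hnil
  exact hnil p hp (by simp)

-- joined values after one more event
theorem pv_joined_concat_ne (events : List (String × String)) (k v k' : String)
    (h : k' ≠ k) :
    pvJoined (events ++ [(k, v)]) k' = pvJoined events k' := by
  simp only [pvJoined, List.filter_append, List.filter_cons, List.filter_nil]
  rw [if_neg (by simpa using Ne.symm h)]
  simp

theorem pv_joined_concat_self_mem (events : List (String × String)) (k v : String)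
    (h : k ∈ events.map Prod.fst) :
    pvJoined (events ++ [(k, v)]) k = pvJoined events k ++ ("/" ++ v) := by
  simp only [pvJoined, List.filter_append, List.filter_cons, List.filter_nil, beq_self_eq_true,
    if_pos, List.map_append, List.map_cons, List.map_nil]
  exact pv_join_append _ v (by simpa using pv_filter_ne_nil events k h)

theorem pv_joined_concat_self_new (events : List (String × String)) (k v : String)
    (h : k ∉ events.map Prod.fst) :
    pvJoined (events ++ [(k, v)]) k = v := by
  simp only [pvJoined, List.filter_append, List.filter_cons, List.filter_nil, beq_self_eq_true,
    if_pos, pv_filter_eq_nil events k h, List.nil_append, List.map_cons, List.map_nil]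
  exact pv_join_singleton v

-- contains on the evaluated dict
theorem pv_contains_eval (events : List (String × String)) (k : String) :
    (PySem.Dict.mk (pvEval events)).contains k = decide (k ∈ events.map Prod.fst) := by
  simp only [PySem.Dict.contains, pvEval, List.any_map, Function.comp_def]
  by_cases h : k ∈ events.map Prod.fst
  · rw [decide_eq_true h, List.any_eq_true]
    exact ⟨k, (PySem.List.mem_dedup _ _).mpr h, by simp⟩
  · rw [decide_eq_false h, List.any_eq_false]
    intro k' hk'
    simp only [beq_iff_eq]
    intro hkk
    exact h (hkk ▸ (PySem.List.mem_dedup _ _).mp hk')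

-- MAIN INVARIANT: A's fold of per-event pushes builds exactly B's evaluated items
theorem pv_main (events : List (String × String)) :
    events.foldl pvPush PySem.Dict.empty = PySem.Dict.mk (pvEval events) := by
  induction events using List.reverseRecOn with
  | nil => rfl
  | append_singleton e ev ih =>
    obtain ⟨k, v⟩ := ev
    rw [List.foldl_append, List.foldl_cons, List.foldl_nil, ih]
    by_cases hk : k ∈ e.map Prod.fst
    · -- key already present: in-place replacement, join gains "/" ++ v
      have hc : (PySem.Dict.mk (pvEval e)).contains k = true := by
        rw [pv_contains_eval]; exact decide_eq_true hk
      have hget : (PySem.Dict.mk (pvEval e)).getD k "" = pvJoined e k := by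
        have hkd : k ∈ PySem.List.dedup (e.map Prod.fst) := (PySem.List.mem_dedup _ _).mpr hk
        simp only [PySem.Dict.getD, PySem.Dict.get?, pvEval,
          pv_find?_map_pair _ (pvJoined e) k hkd]
        rfl
      simp only [pvPush, hc, Bool.true_eq_false, reduceIte, PySem.Dict.insert, hget]
      apply PySem.Dict.ext
      simp only [pvEval, List.map_map]
      have hded : PySem.List.dedup ((e ++ [(k, v)]).map Prod.fst)
          = PySem.List.dedup (e.map Prod.fst) := by
        simp only [List.map_append, List.map_cons, List.map_nil]
        rw [pv_dedup_concat, if_pos hk]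
      rw [hded]
      apply List.map_congr_left
      intro k' _
      by_cases hk'k : k' = k
      · subst hk'k
        simp [Function.comp, pv_joined_concat_self_mem e k' v hk]
      · simp [Function.comp, hk'k, pv_joined_concat_ne e k v k' hk'k]
    · -- new key: appended at the end
      have hc : (PySem.Dict.mk (pvEval e)).contains k = false := by
        rw [pv_contains_eval]; exact decide_eq_false hk
      simp only [pvPush, hc, reduceIte, PySem.Dict.insert, Bool.false_eq_true]
      apply PySem.Dict.ext
      simp only [pvEval]
      have hded : PySem.List.dedup ((e ++ [(k, v)]).map Prod.fst)
          = PySem.List.dedup (e.map Prod.fst) ++ [k] := by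
        simp only [List.map_append, List.map_cons, List.map_nil]
        rw [pv_dedup_concat, if_neg hk]
      rw [hded, List.map_append]
      congr 1
      · apply List.map_congr_left
        intro k' hk'
        have : k' ≠ k := by
          intro h; subst h
          exact hk ((PySem.List.mem_dedup _ _).mp hk')
        rw [pv_joined_concat_ne e k v k' this]
      · simp [pv_joined_concat_self_new e k v hk]

-- the index loop of A over range of the atom count minus two visits exactly the atoms after the second
theorem pv_range_fold (atoms : List String) (g : PySem.Dict String String → String → PySem.Dict String String)
    (d : PySem.Dict String String) :
    (PySem.List.pyRange 0 ((atoms.length : Int) - 2)).foldl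
      (fun d i => g d ((PySem.List.pyGet? atoms (i + 2)).getD "")) d
    = (atoms.drop 2).foldl g d := by
  by_cases hlen : atoms.length ≤ 2
  · have h2 : PySem.List.pyRange 0 ((atoms.length : Int) - 2) = [] := by
      simp [PySem.List.pyRange]; omega
    have h3 : atoms.drop 2 = [] := List.drop_eq_nil_of_le hlen
    rw [h2, h3]
    rfl
  · rw [not_le] at hlen
    have hcast : ((atoms.length : Int) - 2) = ((atoms.length - 2 : Nat) : Int) := by omega
    have key : List.map (fun i => (PySem.List.pyGet? atoms (i + 2)).getD "")
        (List.map (fun (k : Nat) => (k : Int)) (List.range (atoms.length - 2))) = atoms.drop 2 := by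
      rw [List.map_map]
      apply List.ext_getElem
      · simp
      · intro j h1 h2
        simp only [List.getElem_map, List.getElem_range, Function.comp_apply, List.getElem_drop]
        have hj : j + 2 < atoms.length := by
          simp only [List.length_map, List.length_range] at h1
          omega
        have hcj : ((j : Int) + 2) = ((j + 2 : Nat) : Int) := by omega
        rw [hcj]
        show PySem.List.pyGetD atoms ((j + 2 : Nat) : Int) "" = atoms[2 + j]
        rw [PySem.List.pyGetD_natCast, List.getD_eq_getElem _ _ hj]
        congr 1
        omega
    rw [hcast, PySem.List.pyRange_zero_natCast, ← key]
    simp only [List.foldl_map]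

-- one A-step is the fold of pushes over that segment's events
theorem pv_stepA_eq (d : PySem.Dict String String) (seg : String) :
    pvStepA d seg = (pvEventsOf seg).foldl pvPush d := by
  rw [pvStepA, pvEventsOf]
  generalize (PySem.Str.split? seg "[").getD [] = parts
  generalize (if parts.length = 2 then "[" ++ (PySem.List.pyGet? parts 1).getD "" else "") = count
  generalize (PySem.Str.split? ((PySem.List.pyGet? parts 0).getD "") ",").getD [] = atoms
  generalize (PySem.List.pyGet? atoms 0).getD "" = a0
  generalize (PySem.List.pyGet? atoms 1).getD "" = a1
  simp only [List.cons_append, List.nil_append, List.foldl_cons,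
    PySem.List.slice_from _ (by norm_num : (0:Int) ≤ 2), List.foldl_map]
  rw [pv_range_fold atoms (fun d key =>
    if d.contains key = false then d.insert key count
    else d.insert key (d.getD key "" ++ ("/" ++ count)))]
  have hdrop : (2 : Int).toNat = 2 := rfl
  rw [hdrop]
  rfl

-- the whole A fold equals the push-fold over the flattened event stream
theorem pv_foldA (segs : List String) (d : PySem.Dict String String) :
    segs.foldl pvStepA d = (segs.flatMap pvEventsOf).foldl pvPush d := by
  induction segs generalizing d with
  | nil => rfl
  | cons s t ih =>
    simp only [List.foldl_cons, List.flatMap_cons, List.foldl_append, pv_stepA_eq, ih]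

theorem pv_foldA_outer (parts : List String) (d : PySem.Dict String String) :
    parts.foldl (fun d part => ((PySem.Str.split? part "/").getD []).foldl pvStepA d) d
    = (parts.flatMap (fun part =>
        ((PySem.Str.split? part "/").getD []).flatMap pvEventsOf)).foldl pvPush d := by
  induction parts generalizing d with
  | nil => rfl
  | cons p t ih =>
    rw [List.foldl_cons, List.flatMap_cons, List.foldl_append, pv_foldA, ih]

-- ===== VERDICT (by name: the statement is the Claim_ definition above) =====
theorem atomize_karyotype_spec : Claim_equal_atomize_karyotype := by
  intro fk _ _
  unfold Spec_atomize_karyotype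
  simp only [atomize_karyotype, atomize_karyotype_alt]
  simp only [PySem.List.foldl_append_eq_flatMap, List.nil_append]
  rw [pv_foldA_outer, pv_main]
  rfl
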